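-- pv_equiv track=rewrite | github.com/x0xolenok/Distributed-computing-algorithms | lab1_graphs/main.py | isUndirected
-- ===== SOURCE A (Python) =====
-- Neighborhood = dict[int, set[int]]
--
-- def isNeighborhoodCorrect(neighborhood: Neighborhood) -> bool:
--     all_nodes = set(neighborhood.keys())
--     for neighbors in neighborhood.values():
--         if not neighbors.issubset(all_nodes):
--             return False
--     return True
--
-- def isUndirected(neighborhood: Neighborhood) -> bool:
--     if not isNeighborhoodCorrect(neighborhood):
--         return False
--     for node, neighbors in neighborhood.items():
--         for neighbor in neighbors:
--             if node not in neighborhood.get(neighbor, set()):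
--                 return False
--     return True
-- ===== SOURCE B (Python) =====
-- def isUndirected(neighborhood):
--     edges = set()
--     for node, neighbors in neighborhood.items():
--         for neighbor in neighbors:
--             if neighbor not in neighborhood:
--                 return False
--             edges.add((node, neighbor))
--     return all((v, u) in edges for (u, v) in edges)
-- ===== Notes on version B (the rewrite author's own statement) =====
-- stated objective: simpler
-- what changed: Single build pass collects a flat (node, neighbor) edge-tuple set while rejecting neighbors that are not keys (subsuming the separate isNeighborhoodCorrect helper), then checks symmetry by reverse-tuple membership in that set instead of per-node adjacency lookups.
import Mathlib
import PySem

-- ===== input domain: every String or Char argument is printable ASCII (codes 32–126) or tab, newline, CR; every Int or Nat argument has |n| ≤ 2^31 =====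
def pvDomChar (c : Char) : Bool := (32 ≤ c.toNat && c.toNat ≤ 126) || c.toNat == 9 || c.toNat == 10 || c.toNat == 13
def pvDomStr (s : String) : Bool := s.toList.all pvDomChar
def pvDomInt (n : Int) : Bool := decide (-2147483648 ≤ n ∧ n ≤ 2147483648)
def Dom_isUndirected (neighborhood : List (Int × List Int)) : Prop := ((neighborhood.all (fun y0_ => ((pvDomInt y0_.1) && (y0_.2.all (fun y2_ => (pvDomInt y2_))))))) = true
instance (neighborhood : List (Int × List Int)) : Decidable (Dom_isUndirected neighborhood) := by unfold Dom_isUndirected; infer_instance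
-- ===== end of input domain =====

-- B folds the correctness helper into one pass that builds a flat edge-tuple set and
-- then checks symmetry by reverse-tuple membership (objective: simpler decomposition).

-- ===== PORT A =====
-- loop of isNeighborhoodCorrect: 'for neighbors in … .values(): if not issubset: return False'
def pvANCLoop (allNodes : PySem.Set Int) : List (Int × List Int) → Bool
  | [] => true
  | (_, ns) :: rest =>
    if PySem.Set.issubset ns allNodes = false then false else pvANCLoop allNodes rest

def isNeighborhoodCorrect (neighborhood : List (Int × List Int)) : Bool :=
  pvANCLoop (PySem.Set.ofList (PySem.Dict.mk neighborhood).keys) neighborhood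

-- inner loop: 'for neighbor in neighbors: if node not in neighborhood.get(neighbor, set()): return False'
def pvAInner (neighborhood : List (Int × List Int)) (node : Int) : List Int → Bool
  | [] => true
  | m :: rest =>
    if PySem.Set.contains ((PySem.Dict.mk neighborhood).getD m PySem.Set.empty) node = false
    then false else pvAInner neighborhood node rest

-- outer loop: 'for node, neighbors in neighborhood.items(): …'
def pvAOuter (neighborhood : List (Int × List Int)) : List (Int × List Int) → Bool
  | [] => true
  | (node, ns) :: rest =>
    if pvAInner neighborhood node ns = false then false else pvAOuter neighborhood rest

def isUndirected (neighborhood : List (Int × List Int)) : Bool :=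
  if isNeighborhoodCorrect neighborhood = false then false
  else pvAOuter neighborhood neighborhood

-- ===== PORT B =====
-- inner loop of B: reject a neighbor that is not a key, otherwise add the edge tuple
def pvBInner (neighborhood : List (Int × List Int)) (node : Int) :
    List Int → PySem.Set (Int × Int) → Option (PySem.Set (Int × Int))
  | [], edges => some edges
  | m :: rest, edges =>
    if (PySem.Dict.mk neighborhood).contains m = false then none
    else pvBInner neighborhood node rest (PySem.Set.add edges (node, m))

-- outer build pass of B over neighborhood.items()
def pvBLoop (neighborhood : List (Int × List Int)) :
    List (Int × List Int) → PySem.Set (Int × Int) → Option (PySem.Set (Int × Int))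
  | [], edges => some edges
  | (node, ns) :: rest, edges =>
    match pvBInner neighborhood node ns edges with
    | none => none
    | some edges' => pvBLoop neighborhood rest edges'

def isUndirected_alt (neighborhood : List (Int × List Int)) : Bool :=
  match pvBLoop neighborhood neighborhood PySem.Set.empty with
  | none => false
  | some edges => edges.all (fun p => PySem.Set.contains edges (p.2, p.1))

-- ===== PRECONDITION & SPEC =====
-- Pre_ excludes association lists with duplicate keys, which do not represent any
-- Python dict (a dict[int, set[int]] always has distinct keys).
def Pre_isUndirected (neighborhood : List (Int × List Int)) : Prop :=
  (neighborhood.map Prod.fst).Nodup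
instance (neighborhood : List (Int × List Int)) : Decidable (Pre_isUndirected neighborhood) := by
  unfold Pre_isUndirected; infer_instance

def pvWitness_isUndirected : (List (Int × List Int)) := [(1, [2]), (2, [1]), (3, [])]

def Spec_isUndirected (neighborhood : List (Int × List Int)) (out : Bool) : Prop := out = isUndirected_alt neighborhood
instance (neighborhood : List (Int × List Int)) (out : Bool) : Decidable (Spec_isUndirected neighborhood out) := by unfold Spec_isUndirected; infer_instance

-- ===== CLAIM (what is proved, stated in full; the proofs are below) =====
def Claim_equal_isUndirected : Prop := ∀ (neighborhood : List (Int × List Int)), Dom_isUndirected neighborhood → Pre_isUndirected neighborhood → Spec_isUndirected neighborhood (isUndirected neighborhood)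

-- ===== LEMMAS AND PROOFS =====

-- the edge relation of the association list
def pvE (nb : List (Int × List Int)) (n m : Int) : Prop := ∃ ns, (n, ns) ∈ nb ∧ m ∈ ns

lemma pvANCLoop_iff (allNodes : PySem.Set Int) (l : List (Int × List Int)) :
    pvANCLoop allNodes l = true ↔ ∀ p ∈ l, ∀ m ∈ p.2, m ∈ allNodes := by
  induction l with
  | nil => simp [pvANCLoop]
  | cons p rest ih =>
    obtain ⟨n, ns⟩ := p
    simp only [pvANCLoop, List.mem_cons]
    cases hc : PySem.Set.issubset ns allNodes with
    | false =>
      rw [if_pos rfl]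
      simp only [Bool.false_eq_true, false_iff]
      intro h'
      have : PySem.Set.issubset ns allNodes = true :=
        (PySem.Set.issubset_iff ns allNodes).2 (fun x hx => h' (n, ns) (Or.inl rfl) x hx)
      rw [hc] at this; cases this
    | true =>
      rw [if_neg (by simp)]
      have hsub := (PySem.Set.issubset_iff (s := ns) (t := allNodes)).1 hc
      rw [ih]
      constructor
      · rintro h' q (rfl | hq) m hm
        · exact hsub m hm
        · exact h' q hq m hm
      · intro h' q hq; exact h' q (Or.inr hq)

lemma pvNC_iff (nb : List (Int × List Int)) :
    isNeighborhoodCorrect nb = true ↔ ∀ p ∈ nb, ∀ m ∈ p.2, m ∈ nb.map Prod.fst := by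
  unfold isNeighborhoodCorrect
  rw [pvANCLoop_iff]
  simp [PySem.Set.mem_ofList, PySem.Dict.keys]

-- under distinct keys, membership in the looked-up adjacency is the edge relation
lemma pvGetD_mem (nb : List (Int × List Int)) (hnd : (nb.map Prod.fst).Nodup)
    (m n : Int) :
    n ∈ (PySem.Dict.mk nb).getD m PySem.Set.empty ↔ pvE nb m n := by
  induction nb with
  | nil =>
    simp [PySem.Dict.getD, PySem.Dict.get?, pvE, PySem.Set.empty]
  | cons p rest ih =>
    obtain ⟨k, ns⟩ := p
    simp only [List.map_cons, List.nodup_cons] at hnd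
    rw [PySem.Dict.getD_eq_get?_getD, PySem.Dict.get?_mk_cons]
    cases hk : (k == m) with
    | true =>
      rw [if_pos rfl, Option.getD_some]
      have hkm : k = m := by simpa using hk
      subst hkm
      constructor
      · intro hn; exact ⟨ns, List.mem_cons_self .., hn⟩
      · rintro ⟨ns', hmem, hn⟩
        rcases List.mem_cons.1 hmem with h | h
        · cases h; exact hn
        · exact absurd (List.mem_map.2 ⟨(k, ns'), h, rfl⟩) hnd.1
    | false =>
      rw [if_neg (by simp)]
      rw [← PySem.Dict.getD_eq_get?_getD, ih hnd.2]
      have hkm : k ≠ m := by simpa using hk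
      constructor
      · rintro ⟨ns', hmem, hn⟩; exact ⟨ns', List.mem_cons_of_mem _ hmem, hn⟩
      · rintro ⟨ns', hmem, hn⟩
        rcases List.mem_cons.1 hmem with h | h
        · exact absurd (congrArg Prod.fst h).symm hkm
        · exact ⟨ns', h, hn⟩

lemma pvAInner_iff (nb : List (Int × List Int)) (node : Int) (ns : List Int) :
    pvAInner nb node ns = true ↔
      ∀ m ∈ ns, node ∈ (PySem.Dict.mk nb).getD m PySem.Set.empty := by
  induction ns with
  | nil => simp [pvAInner]
  | cons m rest ih =>
    simp only [pvAInner, List.mem_cons]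
    cases hc : PySem.Set.contains ((PySem.Dict.mk nb).getD m PySem.Set.empty) node with
    | false =>
      rw [if_pos rfl]
      simp only [Bool.false_eq_true, false_iff]
      intro h'
      have : PySem.Set.contains ((PySem.Dict.mk nb).getD m PySem.Set.empty) node = true :=
        (PySem.Set.contains_iff _ node).2 (h' m (Or.inl rfl))
      rw [hc] at this; cases this
    | true =>
      rw [if_neg (by simp)]
      have hmem := (PySem.Set.contains_iff _ node).1 hc
      rw [ih]
      constructor
      · rintro h' x (rfl | hx)
        · exact hmem
        · exact h' x hx
      · intro h' x hx; exact h' x (Or.inr hx)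

lemma pvAOuter_iff (nb l : List (Int × List Int)) :
    pvAOuter nb l = true ↔
      ∀ p ∈ l, ∀ m ∈ p.2, p.1 ∈ (PySem.Dict.mk nb).getD m PySem.Set.empty := by
  induction l with
  | nil => simp [pvAOuter]
  | cons p rest ih =>
    obtain ⟨n, ns⟩ := p
    simp only [pvAOuter, List.mem_cons]
    cases hc : pvAInner nb n ns with
    | false =>
      rw [if_pos rfl]
      simp only [Bool.false_eq_true, false_iff]
      intro h'
      have : pvAInner nb n ns = true :=
        (pvAInner_iff nb n ns).2 (fun m hm => h' (n, ns) (Or.inl rfl) m hm)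
      rw [hc] at this; cases this
    | true =>
      rw [if_neg (by simp)]
      have hin := (pvAInner_iff nb n ns).1 hc
      rw [ih]
      constructor
      · rintro h' q (rfl | hq) m hm
        · exact hin m hm
        · exact h' q hq m hm
      · intro h' q hq; exact h' q (Or.inr hq)

-- characterization of port A
lemma pvA_iff (nb : List (Int × List Int)) (hnd : (nb.map Prod.fst).Nodup) :
    isUndirected nb = true ↔
      (∀ p ∈ nb, ∀ m ∈ p.2, m ∈ nb.map Prod.fst) ∧ (∀ n m, pvE nb n m → pvE nb m n) := by
  unfold isUndirected
  cases hc : isNeighborhoodCorrect nb with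
  | false =>
    rw [if_pos rfl]
    simp only [Bool.false_eq_true, false_iff]
    rintro ⟨hok, -⟩
    have : isNeighborhoodCorrect nb = true := (pvNC_iff nb).2 hok
    rw [hc] at this; cases this
  | true =>
    rw [if_neg (by simp)]
    have hok := (pvNC_iff nb).1 hc
    rw [pvAOuter_iff]
    constructor
    · intro h'
      refine ⟨hok, ?_⟩
      rintro n m ⟨ns, hmem, hm⟩
      have := h' (n, ns) hmem m hm
      rw [pvGetD_mem nb hnd] at this
      exact this
    · rintro ⟨-, hsym⟩ p hp m hm
      rw [pvGetD_mem nb hnd]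
      exact hsym p.1 m ⟨p.2, by simpa using hp, hm⟩

-- B's inner loop: none iff some neighbor is not a key; otherwise the accumulated set
lemma pvBInner_spec (nb : List (Int × List Int)) (node : Int) (ns : List Int)
    (edges : PySem.Set (Int × Int)) :
    (pvBInner nb node ns edges = none ↔ ∃ m ∈ ns, m ∉ nb.map Prod.fst) ∧
    (∀ edges', pvBInner nb node ns edges = some edges' →
      ∀ q, q ∈ edges' ↔ q ∈ edges ∨ ∃ m ∈ ns, q = (node, m)) := by
  induction ns generalizing edges with
  | nil => simp [pvBInner]
  | cons m rest ih =>
    simp only [pvBInner]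
    cases hc : (PySem.Dict.mk nb).contains m with
    | false =>
      rw [if_pos rfl]
      have hm : m ∉ nb.map Prod.fst := by
        intro hmem
        have : (PySem.Dict.mk nb).contains m = true :=
          (PySem.Dict.contains_iff_mem_keys _ m).2 hmem
        rw [hc] at this; cases this
      exact ⟨by simp only [true_iff]; exact ⟨m, List.mem_cons_self .., hm⟩,
        fun e' he' => by cases he'⟩
    | true =>
      rw [if_neg (by simp)]
      have hm : m ∈ nb.map Prod.fst := (PySem.Dict.contains_iff_mem_keys _ m).1 hc
      obtain ⟨ihn, ihs⟩ := ih (PySem.Set.add edges (node, m))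
      constructor
      · rw [ihn]
        constructor
        · rintro ⟨x, hx, hxn⟩; exact ⟨x, List.mem_cons_of_mem _ hx, hxn⟩
        · rintro ⟨x, hx, hxn⟩
          rcases List.mem_cons.1 hx with rfl | hx
          · exact absurd hm hxn
          · exact ⟨x, hx, hxn⟩
      · intro e' he' q
        rw [ihs e' he' q, PySem.Set.mem_add]
        constructor
        · rintro ((hq | rfl) | ⟨x, hx, rfl⟩)
          · exact Or.inl hq
          · exact Or.inr ⟨m, List.mem_cons_self .., rfl⟩
          · exact Or.inr ⟨x, List.mem_cons_of_mem _ hx, rfl⟩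
        · rintro (hq | ⟨x, hx, rfl⟩)
          · exact Or.inl (Or.inl hq)
          · rcases List.mem_cons.1 hx with rfl | hx
            · exact Or.inl (Or.inr rfl)
            · exact Or.inr ⟨x, hx, rfl⟩

-- B's outer loop
lemma pvBLoop_spec (nb : List (Int × List Int)) (l : List (Int × List Int))
    (edges : PySem.Set (Int × Int)) :
    (pvBLoop nb l edges = none ↔ ∃ p ∈ l, ∃ m ∈ p.2, m ∉ nb.map Prod.fst) ∧
    (∀ edges', pvBLoop nb l edges = some edges' →
      ∀ q, q ∈ edges' ↔ q ∈ edges ∨ ∃ p ∈ l, p.1 = q.1 ∧ q.2 ∈ p.2) := by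
  induction l generalizing edges with
  | nil => simp [pvBLoop]
  | cons p rest ih =>
    obtain ⟨node, ns⟩ := p
    simp only [pvBLoop]
    obtain ⟨hinN, hinS⟩ := pvBInner_spec nb node ns edges
    cases he : pvBInner nb node ns edges with
    | none =>
      constructor
      · obtain ⟨m, hm, hmn⟩ := hinN.1 he
        exact iff_of_true rfl ⟨(node, ns), List.mem_cons_self .., m, hm, hmn⟩
      · intro e' h'
        cases h'
    | some e1 =>
      obtain ⟨ihn, ihs⟩ := ih e1
      constructor
      · rw [ihn]
        constructor
        · rintro ⟨q, hq, hm⟩; exact ⟨q, List.mem_cons_of_mem _ hq, hm⟩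
        · rintro ⟨q, hq, m, hm, hmn⟩
          rcases List.mem_cons.1 hq with rfl | hq
          · exact absurd (hinN.2 ⟨m, hm, hmn⟩) (fun hcon => by rw [he] at hcon; cases hcon)
          · exact ⟨q, hq, m, hm, hmn⟩
      · intro e' he' q
        rw [ihs e' he' q, hinS e1 he q]
        constructor
        · rintro ((hq | ⟨m, hm, rfl⟩) | ⟨r, hr, h1, h2⟩)
          · exact Or.inl hq
          · exact Or.inr ⟨(node, ns), List.mem_cons_self .., rfl, hm⟩
          · exact Or.inr ⟨r, List.mem_cons_of_mem _ hr, h1, h2⟩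
        · rintro (hq | ⟨r, hr, h1, h2⟩)
          · exact Or.inl (Or.inl hq)
          · rcases List.mem_cons.1 hr with rfl | hr
            · exact Or.inl (Or.inr ⟨q.2, h2, Prod.ext h1.symm rfl⟩)
            · exact Or.inr ⟨r, hr, h1, h2⟩

-- characterization of port B
lemma pvB_iff (nb : List (Int × List Int)) :
    isUndirected_alt nb = true ↔
      (∀ p ∈ nb, ∀ m ∈ p.2, m ∈ nb.map Prod.fst) ∧ (∀ n m, pvE nb n m → pvE nb m n) := by
  unfold isUndirected_alt
  obtain ⟨hN, hS⟩ := pvBLoop_spec nb nb PySem.Set.empty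
  cases he : pvBLoop nb nb PySem.Set.empty with
  | none =>
    simp only [Bool.false_eq_true, false_iff]
    rintro ⟨hok, -⟩
    obtain ⟨p, hp, m, hm, hmn⟩ := hN.1 he
    exact hmn (hok p hp m hm)
  | some edges =>
    have hok : ∀ p ∈ nb, ∀ m ∈ p.2, m ∈ nb.map Prod.fst := by
      by_contra hc
      simp only [not_forall] at hc
      obtain ⟨p, hp, m, hm, hmn⟩ := hc
      exact absurd (hN.2 ⟨p, hp, m, hm, hmn⟩) (fun hcon => by rw [he] at hcon; cases hcon)
    have hmemE : ∀ q : Int × Int, q ∈ edges ↔ pvE nb q.1 q.2 := by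
      intro q
      rw [hS edges he q]
      simp only [PySem.Set.empty, List.not_mem_nil, false_or]
      constructor
      · rintro ⟨p, hp, h1, h2⟩; exact ⟨p.2, by rw [← h1, Prod.mk.eta]; exact hp, h2⟩
      · rintro ⟨ns, hmem, hm⟩; exact ⟨(q.1, ns), hmem, rfl, hm⟩
    simp only [List.all_eq_true]
    constructor
    · intro hall
      refine ⟨hok, ?_⟩
      intro n m hE
      have hq : (n, m) ∈ edges := (hmemE (n, m)).2 hE
      have := (PySem.Set.contains_iff _ _).1 (hall _ hq)
      exact (hmemE (m, n)).1 this
    · rintro ⟨-, hsym⟩ q hq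
      exact (PySem.Set.contains_iff _ _).2 ((hmemE (q.2, q.1)).2 (hsym q.1 q.2 ((hmemE q).1 hq)))

-- ===== VERDICT (by name: the statement is the Claim_ definition above) =====
theorem isUndirected_spec : Claim_equal_isUndirected := by
  intro nb _ hpre
  unfold Spec_isUndirected
  have hA := pvA_iff nb hpre
  have hB := pvB_iff nb
  cases h1 : isUndirected nb <;> cases h2 : isUndirected_alt nb
  · rfl
  · exact absurd (hA.2 (hB.1 h2)) (by simp [h1])
  · exact absurd (hB.2 (hA.1 h1)) (by simp [h2])
  · rfl
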